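-- pv_equiv track=rewrite | github.com/unconst/tau | agent/scripts/self_improve.py | get_adaptive_params
-- ===== SOURCE A (Python) =====
-- def get_adaptive_params(memory: dict) -> dict:
--     """Adjust parameters based on recent failure patterns."""
--     recent = memory.get("history", [])[-10:]
--
--     recent_parse = sum(1 for h in recent if h.get("outcome") == "parse_error")
--     recent_timeout = sum(1 for h in recent if h.get("outcome") == "timeout")
--     recent_crash = sum(1 for h in recent if h.get("outcome") == "crash")
--     recent_syntax = sum(1 for h in recent if h.get("outcome") in ("syntax_error", "import_error"))
--
--     return {
--         "add_format_examples": recent_parse >= 2,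
--         "simplify_tasks": recent_crash >= 2 or recent_syntax >= 3,
--         "increase_timeout": recent_timeout >= 2,
--         "emphasize_syntax": recent_syntax >= 2,
--     }
-- ===== SOURCE B (Python) =====
-- def get_adaptive_params(memory: dict) -> dict:
--     """Adjust parameters based on recent failure patterns."""
--     counts = {}
--     for h in memory.get("history", [])[-10:]:
--         o = h.get("outcome")
--         counts[o] = counts.get(o, 0) + 1
--     syntax = counts.get("syntax_error", 0) + counts.get("import_error", 0)
--     return {
--         "add_format_examples": counts.get("parse_error", 0) >= 2,
--         "simplify_tasks": counts.get("crash", 0) >= 2 or syntax >= 3,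
--         "increase_timeout": counts.get("timeout", 0) >= 2,
--         "emphasize_syntax": syntax >= 2,
--     }
-- ===== Notes on version B (the rewrite author's own statement) =====
-- stated objective: simpler
-- what changed: Replaces four separate scans of the recent history (one generator-sum per outcome kind) with a single tally pass building an outcome-frequency table, from which the four booleans are read off.
import Mathlib
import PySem

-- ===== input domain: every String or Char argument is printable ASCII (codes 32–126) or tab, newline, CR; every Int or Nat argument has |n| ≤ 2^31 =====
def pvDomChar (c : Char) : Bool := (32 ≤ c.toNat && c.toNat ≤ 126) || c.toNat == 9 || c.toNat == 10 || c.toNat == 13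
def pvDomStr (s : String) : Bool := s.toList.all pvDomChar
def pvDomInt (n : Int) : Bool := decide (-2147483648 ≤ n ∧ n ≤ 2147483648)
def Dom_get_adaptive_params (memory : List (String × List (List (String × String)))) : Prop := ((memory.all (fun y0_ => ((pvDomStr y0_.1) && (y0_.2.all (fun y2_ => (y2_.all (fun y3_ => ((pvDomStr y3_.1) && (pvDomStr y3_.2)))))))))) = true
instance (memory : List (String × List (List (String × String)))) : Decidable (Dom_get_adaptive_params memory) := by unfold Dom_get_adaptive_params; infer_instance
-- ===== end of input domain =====

-- B replaces A's four separate scans of the recent history with a single tally pass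
-- into an outcome-frequency table; the four booleans are read from the table (simpler).

-- ===== PORT A =====
def get_adaptive_params (memory : List (String × List (List (String × String)))) : List (String × Bool) :=
  let recent := PySem.List.slice ((PySem.Dict.mk memory).getD "history" []) (some (-10)) none
  let recent_parse : Int :=
    (recent.map (fun h => if (PySem.Dict.mk h).get? "outcome" == some "parse_error" then (1 : Int) else 0)).sum
  let recent_timeout : Int :=
    (recent.map (fun h => if (PySem.Dict.mk h).get? "outcome" == some "timeout" then (1 : Int) else 0)).sum
  let recent_crash : Int :=
    (recent.map (fun h => if (PySem.Dict.mk h).get? "outcome" == some "crash" then (1 : Int) else 0)).sum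
  let recent_syntax : Int :=
    (recent.map (fun h => if (PySem.Dict.mk h).get? "outcome" == some "syntax_error" ||
                             (PySem.Dict.mk h).get? "outcome" == some "import_error" then (1 : Int) else 0)).sum
  [("add_format_examples", decide (2 ≤ recent_parse)),
   ("simplify_tasks", decide (2 ≤ recent_crash) || decide (3 ≤ recent_syntax)),
   ("increase_timeout", decide (2 ≤ recent_timeout)),
   ("emphasize_syntax", decide (2 ≤ recent_syntax))]

-- ===== PORT B =====
def get_adaptive_params_alt (memory : List (String × List (List (String × String)))) : List (String × Bool) :=
  let recent := PySem.List.slice ((PySem.Dict.mk memory).getD "history" []) (some (-10)) none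
  let counts : PySem.Dict (Option String) Int :=
    recent.foldl (fun d h => d.modify ((PySem.Dict.mk h).get? "outcome") 0 (· + 1)) PySem.Dict.empty
  let syn : Int := counts.getD (some "syntax_error") 0 + counts.getD (some "import_error") 0
  [("add_format_examples", decide (2 ≤ counts.getD (some "parse_error") 0)),
   ("simplify_tasks", decide (2 ≤ counts.getD (some "crash") 0) || decide (3 ≤ syn)),
   ("increase_timeout", decide (2 ≤ counts.getD (some "timeout") 0)),
   ("emphasize_syntax", decide (2 ≤ syn))]

-- ===== PRECONDITION & SPEC =====
def Spec_get_adaptive_params (memory : List (String × List (List (String × String)))) (out : List (String × Bool)) : Prop := out = get_adaptive_params_alt memory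
instance (memory : List (String × List (List (String × String)))) (out : List (String × Bool)) : Decidable (Spec_get_adaptive_params memory out) := by unfold Spec_get_adaptive_params; infer_instance

-- ===== CLAIM (what is proved, stated in full; the proofs are below) =====
def Claim_equal_get_adaptive_params : Prop := ∀ (memory : List (String × List (List (String × String)))), Dom_get_adaptive_params memory → Spec_get_adaptive_params memory (get_adaptive_params memory)

-- ===== LEMMAS AND PROOFS =====

-- B's tally lookup equals a count on the mapped outcome list.
theorem pv_getD_tally {α : Type} (l : List α) (f : α → Option String) (v : Option String) :
    ((l.foldl (fun d h => d.modify (f h) 0 (· + 1)) PySem.Dict.empty).getD v 0 : Int)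
      = ((l.map f).count v : Int) := by
  have h1 : (l.foldl (fun d h => d.modify (f h) 0 (· + 1)) (PySem.Dict.empty : PySem.Dict (Option String) Int))
      = ((l.map f).foldl (fun d x => d.modify x 0 (· + 1)) PySem.Dict.empty) := by
    rw [List.foldl_map]
  rw [h1, PySem.Dict.getD_foldl_modify_add_one]
  simp [PySem.Dict.empty, PySem.Dict.getD, PySem.Dict.get?]

-- A's 0/1-sum equals a count on the mapped outcome list.
theorem pv_sum_count {α : Type} (l : List α) (f : α → Option String) (s : String) :
    (l.map (fun h => if f h == some s then (1 : Int) else 0)).sum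
      = ((l.map f).count (some s) : Int) := by
  rw [PySem.List.sum_map_ite_one_zero, List.count_eq_countP, List.countP_map]
  simp [Function.comp_def]

-- a count under a disjunction of two distinct targets splits into a sum
theorem pv_countP_or (l : List (Option String)) (a b : String) (hab : a ≠ b) :
    l.countP (fun o => o == some a || o == some b)
      = l.count (some a) + l.count (some b) := by
  induction l with
  | nil => simp
  | cons x xs ih =>
    simp only [List.countP_cons, List.count_cons, ih]
    by_cases hx1 : x = some a
    · simp [hx1, hab]; omega
    · by_cases hx2 : x = some b
      · simp [hx2, Ne.symm hab]; omega
      · simp [hx1, hx2]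

-- A's 0/1-sum over the two-way membership test equals the sum of the two counts.
theorem pv_sum_or {α : Type} (l : List α) (f : α → Option String) (a b : String) (hab : a ≠ b) :
    (l.map (fun h => if f h == some a || f h == some b then (1 : Int) else 0)).sum
      = ((l.map f).count (some a) : Int) + ((l.map f).count (some b) : Int) := by
  rw [PySem.List.sum_map_ite_one_zero]
  have h2 := pv_countP_or (l.map f) a b hab
  rw [List.countP_map] at h2
  simp only [Function.comp_def] at h2
  exact_mod_cast h2

-- ===== VERDICT (by name: the statement is the Claim_ definition above) =====
theorem get_adaptive_params_spec : Claim_equal_get_adaptive_params := by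
  intro memory _
  unfold Spec_get_adaptive_params get_adaptive_params get_adaptive_params_alt
  set recent := PySem.List.slice ((PySem.Dict.mk memory).getD "history" []) (some (-10)) none with hrec
  have htally := fun v => pv_getD_tally recent (fun h => (PySem.Dict.mk h).get? "outcome") v
  have hsum := fun s => pv_sum_count recent (fun h => (PySem.Dict.mk h).get? "outcome") s
  have hsyn := pv_sum_or recent (fun h => (PySem.Dict.mk h).get? "outcome")
      "syntax_error" "import_error" (by decide)
  simp only at htally hsum hsyn
  simp only [htally, hsum, hsyn]
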